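-- pv_equiv track=rewrite | github.com/adamanz/reaction-reach | create_real_gmail_drafts.py | get_personalized_opening
-- ===== SOURCE A (Python) =====
-- def get_personalized_opening(job_title, company):
--     """Generate personalized opening based on job info"""
--
--     title_lower = job_title.lower() if job_title != "N/A" else ""
--
--     if any(term in title_lower for term in ['engineer', 'developer', 'technical', 'software']):
--         return "As someone in the tech space, I thought you might find value in the discussions around innovation and technology trends that my posts often generate."
--     elif any(term in title_lower for term in ['manager', 'director', 'vp', 'vice president', 'lead']):
--         return "I appreciate leaders like yourself taking time to engage with professional content, and I'd value your perspective on the topics I share."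
--     elif any(term in title_lower for term in ['founder', 'ceo', 'entrepreneur', 'co-founder']):
--         return "I have great respect for fellow entrepreneurs and founders, and I'd love to hear about your journey and current ventures."
--     elif any(term in title_lower for term in ['analyst', 'consultant', 'specialist']):
--         return "Your expertise caught my attention, and I'd be interested to learn more about your professional insights and experience."
--     elif company not in ["N/A", "your company"] and company:
--         return f"Your work at {company} caught my attention, and I'd be interested to learn more about what you're building there."
--     else:
--         return "I appreciate professionals who take time to engage with thoughtful content, and I'd value the opportunity to connect."
-- ===== SOURCE B (Python) =====
-- KEYWORD_CATEGORY = {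
--     'engineer': 0, 'developer': 0, 'technical': 0, 'software': 0,
--     'manager': 1, 'director': 1, 'vp': 1, 'vice president': 1, 'lead': 1,
--     'founder': 2, 'ceo': 2, 'entrepreneur': 2, 'co-founder': 2,
--     'analyst': 3, 'consultant': 3, 'specialist': 3,
-- }
--
-- MESSAGES = [
--     "As someone in the tech space, I thought you might find value in the discussions around innovation and technology trends that my posts often generate.",
--     "I appreciate leaders like yourself taking time to engage with professional content, and I'd value your perspective on the topics I share.",
--     "I have great respect for fellow entrepreneurs and founders, and I'd love to hear about your journey and current ventures.",
--     "Your expertise caught my attention, and I'd be interested to learn more about your professional insights and experience.",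
-- ]
--
--
-- def get_personalized_opening(job_title, company):
--     """Generate personalized opening based on job info"""
--     title = job_title.lower() if job_title != "N/A" else ""
--     # One pass over the title: at each position, see which keywords start there
--     # and keep the smallest (highest-priority) category seen anywhere.
--     best = 4
--     for i in range(len(title)):
--         for kw, cat in KEYWORD_CATEGORY.items():
--             if cat < best and title.startswith(kw, i):
--                 best = cat
--     if best < 4:
--         return MESSAGES[best]
--     if company not in ["N/A", "your company"] and company:
--         return f"Your work at {company} caught my attention, and I'd be interested to learn more about what you're building there."
--     return "I appreciate professionals who take time to engage with thoughtful content, and I'd value the opportunity to connect."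
-- ===== Notes on version B (the rewrite author's own statement) =====
-- stated objective: alternative
-- what changed: Instead of substring-searching the whole title once per category (an if/elif cascade of any(term in title)), B makes one left-to-right pass over the title's positions, matching all keywords at each position and keeping the minimum (highest-priority) category found, then indexes a message table; the company fallback and default stay as explicit tails.
import Mathlib
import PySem

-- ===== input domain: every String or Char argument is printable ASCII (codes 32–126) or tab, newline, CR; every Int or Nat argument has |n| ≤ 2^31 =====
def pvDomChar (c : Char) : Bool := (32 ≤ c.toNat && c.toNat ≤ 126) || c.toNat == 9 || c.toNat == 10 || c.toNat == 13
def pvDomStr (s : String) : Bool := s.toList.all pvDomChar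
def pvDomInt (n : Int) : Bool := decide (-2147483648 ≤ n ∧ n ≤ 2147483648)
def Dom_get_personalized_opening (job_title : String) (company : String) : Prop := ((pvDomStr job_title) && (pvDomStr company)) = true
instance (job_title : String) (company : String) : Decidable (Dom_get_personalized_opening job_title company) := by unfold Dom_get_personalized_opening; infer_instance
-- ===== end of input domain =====

-- B replaces A's per-category substring-search cascade by a single left-to-right pass
-- over the title's positions, keeping the minimum (highest-priority) matching category
-- (objective: alternative; same asymptotic cost).

-- ===== PORT A =====
-- literal transliteration of A's if/elif cascade
def get_personalized_opening (job_title : String) (company : String) : String :=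
  let title_lower := if job_title != "N/A" then PySem.Str.lower job_title else ""
  if (["engineer", "developer", "technical", "software"].any
      (fun term => PySem.Str.isIn term title_lower)) then
    "As someone in the tech space, I thought you might find value in the discussions around innovation and technology trends that my posts often generate."
  else if (["manager", "director", "vp", "vice president", "lead"].any
      (fun term => PySem.Str.isIn term title_lower)) then
    "I appreciate leaders like yourself taking time to engage with professional content, and I'd value your perspective on the topics I share."
  else if (["founder", "ceo", "entrepreneur", "co-founder"].any
      (fun term => PySem.Str.isIn term title_lower)) then
    "I have great respect for fellow entrepreneurs and founders, and I'd love to hear about your journey and current ventures."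
  else if (["analyst", "consultant", "specialist"].any
      (fun term => PySem.Str.isIn term title_lower)) then
    "Your expertise caught my attention, and I'd be interested to learn more about your professional insights and experience."
  else if ((company != "N/A" && company != "your company") && company != "") then
    "Your work at " ++ company ++ " caught my attention, and I'd be interested to learn more about what you're building there."
  else
    "I appreciate professionals who take time to engage with thoughtful content, and I'd value the opportunity to connect."

-- ===== PORT B =====
-- Source B's module-level KEYWORD_CATEGORY dict (insertion order) and MESSAGES list
def pvKwCat : List (List Char × Nat) :=
  [ ("engineer".toList, 0), ("developer".toList, 0), ("technical".toList, 0), ("software".toList, 0),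
    ("manager".toList, 1), ("director".toList, 1), ("vp".toList, 1), ("vice president".toList, 1), ("lead".toList, 1),
    ("founder".toList, 2), ("ceo".toList, 2), ("entrepreneur".toList, 2), ("co-founder".toList, 2),
    ("analyst".toList, 3), ("consultant".toList, 3), ("specialist".toList, 3) ]

def pvMessages : List String :=
  [ "As someone in the tech space, I thought you might find value in the discussions around innovation and technology trends that my posts often generate.",
    "I appreciate leaders like yourself taking time to engage with professional content, and I'd value your perspective on the topics I share.",
    "I have great respect for fellow entrepreneurs and founders, and I'd love to hear about your journey and current ventures.",
    "Your expertise caught my attention, and I'd be interested to learn more about your professional insights and experience." ]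

-- title.startswith(kw, i) with 0 ≤ i is exactly Chars.startswith on the drop at i
def get_personalized_opening_alt (job_title : String) (company : String) : String :=
  let title := if job_title != "N/A" then PySem.Str.lower job_title else ""
  let t := title.toList
  let best := (List.range t.length).foldl
    (fun b i => pvKwCat.foldl
      (fun b' kc => if kc.2 < b' && PySem.Chars.startswith (List.drop i t) kc.1 then kc.2 else b') b) 4
  if best < 4 then
    pvMessages.getD best ""   -- MESSAGES[best], best < 4 guaranteed by the guard
  else if ((company != "N/A" && company != "your company") && company != "") then
    "Your work at " ++ company ++ " caught my attention, and I'd be interested to learn more about what you're building there."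
  else
    "I appreciate professionals who take time to engage with thoughtful content, and I'd value the opportunity to connect."

-- ===== PRECONDITION & SPEC =====
def Spec_get_personalized_opening (job_title : String) (company : String) (out : String) : Prop := out = get_personalized_opening_alt job_title company
instance (job_title : String) (company : String) (out : String) : Decidable (Spec_get_personalized_opening job_title company out) := by unfold Spec_get_personalized_opening; infer_instance

-- ===== CLAIM (what is proved, stated in full; the proofs are below) =====
def Claim_equal_get_personalized_opening : Prop := ∀ (job_title : String) (company : String), Dom_get_personalized_opening job_title company → Spec_get_personalized_opening job_title company (get_personalized_opening job_title company)

-- ===== LEMMAS AND PROOFS =====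

-- inner loop of B: scan the keyword table at one fixed position
def pvG (s : List Char) (l : List (List Char × Nat)) (b : Nat) : Nat :=
  l.foldl (fun b' kc => if kc.2 < b' && PySem.Chars.startswith s kc.1 then kc.2 else b') b

-- outer loop of B: scan the positions 0..n-1
def pvH (t : List Char) (n : Nat) (b : Nat) : Nat :=
  (List.range n).foldl (fun b i => pvG (List.drop i t) pvKwCat b) b

lemma pvG_le (s : List Char) (l : List (List Char × Nat)) (b : Nat) : pvG s l b ≤ b := by
  induction l generalizing b with
  | nil => simp [pvG]
  | cons kc rest ih =>
      simp only [pvG, List.foldl_cons]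
      refine le_trans (ih _) ?_
      split_ifs with h
      · have := h; simp only [Bool.and_eq_true, decide_eq_true_eq] at this
        exact Nat.le_of_lt this.1
      · exact le_rfl

lemma pvG_le_of_mem (s : List Char) (l : List (List Char × Nat)) (b : Nat)
    (kc : List Char × Nat) (hmem : kc ∈ l) (hs : PySem.Chars.startswith s kc.1 = true) :
    pvG s l b ≤ kc.2 := by
  induction l generalizing b with
  | nil => simp at hmem
  | cons kc' rest ih =>
      simp only [pvG, List.foldl_cons]
      rcases List.mem_cons.mp hmem with h | h
      · subst h
        by_cases hlt : kc.2 < b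
        · rw [if_pos (by simp [hlt, hs])]
          exact pvG_le _ _ _
        · rw [if_neg (by simp [hlt])]
          refine le_trans (pvG_le _ _ _) (by omega)
      · exact ih _ h

lemma pvG_cases (s : List Char) (l : List (List Char × Nat)) (b : Nat) :
    pvG s l b = b ∨ ∃ kc ∈ l, PySem.Chars.startswith s kc.1 = true ∧ pvG s l b = kc.2 := by
  induction l generalizing b with
  | nil => left; simp [pvG]
  | cons kc rest ih =>
      simp only [pvG, List.foldl_cons]
      by_cases h : (kc.2 < b && PySem.Chars.startswith s kc.1) = true
      · rw [if_pos h]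
        rcases ih kc.2 with h1 | ⟨kc', hm, hs, he⟩
        · have hh := h; simp only [Bool.and_eq_true] at hh
          exact Or.inr ⟨kc, List.mem_cons_self, hh.2, h1⟩
        · exact Or.inr ⟨kc', List.mem_cons_of_mem _ hm, hs, he⟩
      · rw [if_neg h]
        rcases ih b with h1 | ⟨kc', hm, hs, he⟩
        · exact Or.inl h1
        · exact Or.inr ⟨kc', List.mem_cons_of_mem _ hm, hs, he⟩

lemma pvH_succ (t : List Char) (n : Nat) (b : Nat) :
    pvH t (n + 1) b = pvG (List.drop n t) pvKwCat (pvH t n b) := by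
  simp [pvH, List.range_succ, List.foldl_append]

lemma pvH_le (t : List Char) (n : Nat) (b : Nat) : pvH t n b ≤ b := by
  induction n generalizing b with
  | zero => simp [pvH]
  | succ n ih =>
      rw [pvH_succ]
      exact le_trans (pvG_le _ _ _) (ih b)

lemma pvH_le_of (t : List Char) (n : Nat) (b : Nat) (i : Nat) (hi : i < n)
    (kc : List Char × Nat) (hmem : kc ∈ pvKwCat)
    (hs : PySem.Chars.startswith (List.drop i t) kc.1 = true) :
    pvH t n b ≤ kc.2 := by
  induction n generalizing b with
  | zero => omega
  | succ n ih =>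
      rw [pvH_succ]
      rcases Nat.lt_succ_iff_lt_or_eq.mp hi with h | h
      · exact le_trans (pvG_le _ _ _) (ih b h)
      · subst h
        exact pvG_le_of_mem _ _ _ kc hmem hs

lemma pvH_cases (t : List Char) (n : Nat) (b : Nat) :
    pvH t n b = b ∨ ∃ i < n, ∃ kc ∈ pvKwCat,
      PySem.Chars.startswith (List.drop i t) kc.1 = true ∧ pvH t n b = kc.2 := by
  induction n generalizing b with
  | zero => left; simp [pvH]
  | succ n ih =>
      rw [pvH_succ]
      rcases pvG_cases (List.drop n t) pvKwCat (pvH t n b) with h1 | ⟨kc, hm, hs, he⟩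
      · rcases ih b with h2 | ⟨i, hi, kc, hm, hs, he⟩
        · left; omega
        · right
          exact ⟨i, by omega, kc, hm, hs, by omega⟩
      · exact Or.inr ⟨n, by omega, kc, hm, hs, he⟩

-- bridge: a nonempty keyword starts at some position i < length iff it is a substring
lemma startswith_exists_iff (t kw : List Char) (hkw : kw ≠ []) :
    (∃ i < t.length, PySem.Chars.startswith (List.drop i t) kw = true) ↔
      PySem.Chars.isIn kw t = true := by
  constructor
  · rintro ⟨i, _, hs⟩
    exact (PySem.Chars.exists_prefix_drop_iff_isIn _ _).mp
      ⟨i, (PySem.Chars.startswith_iff _ _).mp hs⟩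
  · intro h
    rcases (PySem.Chars.exists_prefix_drop_iff_isIn _ _).mpr h with ⟨j, hj⟩
    by_cases hlt : j < t.length
    · exact ⟨j, hlt, (PySem.Chars.startswith_iff _ _).mpr hj⟩
    · exfalso
      have : List.drop j t = [] := List.drop_eq_nil_of_le (by omega)
      rw [this] at hj
      exact hkw (List.prefix_nil.mp hj)

-- A's keyword list for each category
def pvCatList : Nat → List String
  | 0 => ["engineer", "developer", "technical", "software"]
  | 1 => ["manager", "director", "vp", "vice president", "lead"]
  | 2 => ["founder", "ceo", "entrepreneur", "co-founder"]
  | 3 => ["analyst", "consultant", "specialist"]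
  | _ => []

lemma pvKwCat_sound : ∀ kc ∈ pvKwCat, kc.1 ≠ [] ∧ kc.2 ≤ 3 ∧ kc.1 ∈ (pvCatList kc.2).map String.toList := by
  decide

lemma pvKwCat_complete : ∀ c ≤ 3, ∀ term ∈ pvCatList c, (term.toList, c) ∈ pvKwCat := by
  decide

-- A's any-condition for category c, phrased over the title string
def pvCond (c : Nat) (title : String) : Bool :=
  (pvCatList c).any (fun term => PySem.Str.isIn term title)

lemma pvCond_iff (c : Nat) (hc : c ≤ 3) (title : String) :
    pvCond c title = true ↔
      ∃ kc ∈ pvKwCat, kc.2 = c ∧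
        (∃ i < title.toList.length, PySem.Chars.startswith (List.drop i title.toList) kc.1 = true) := by
  constructor
  · intro h
    rcases List.any_eq_true.mp h with ⟨term, hterm, hin⟩
    have hmem := pvKwCat_complete c hc term hterm
    have hne : term.toList ≠ [] := ((pvKwCat_sound _ hmem).1)
    refine ⟨(term.toList, c), hmem, rfl, ?_⟩
    exact (startswith_exists_iff title.toList term.toList hne).mpr (by simpa using hin)
  · rintro ⟨kc, hmem, hcat, hex⟩
    obtain ⟨hne, _, hlist⟩ := pvKwCat_sound kc hmem
    rcases List.mem_map.mp hlist with ⟨term, hterm, hteq⟩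
    refine List.any_eq_true.mpr ⟨term, by rw [hcat] at hterm; exact hterm, ?_⟩
    have := (startswith_exists_iff title.toList kc.1 hne).mp hex
    rw [← hteq] at this
    simpa using this

-- the minimum-category pass computes exactly A's cascade order
lemma pvBest_spec (title : String) :
    pvH title.toList title.toList.length 4 =
      (if pvCond 0 title then 0 else if pvCond 1 title then 1 else
       if pvCond 2 title then 2 else if pvCond 3 title then 3 else 4) := by
  set t := title.toList with ht
  have hnot : ∀ c ≤ 3, pvCond c title = false →
      pvH t t.length 4 ≠ c := by
    intro c hc hcond heq
    rcases pvH_cases t t.length 4 with h | ⟨i, hi, kc, hm, hs, he⟩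
    · omega
    · have : pvCond kc.2 title = true := by
        refine (pvCond_iff kc.2 (pvKwCat_sound kc hm).2.1 title).mpr ⟨kc, hm, rfl, i, ?_, hs⟩
        exact hi
      rw [he] at heq
      rw [heq] at this
      rw [this] at hcond
      simp at hcond
  have hle : ∀ c ≤ 3, pvCond c title = true → pvH t t.length 4 ≤ c := by
    intro c hc hcond
    rcases (pvCond_iff c hc title).mp hcond with ⟨kc, hm, hcat, i, hi, hs⟩
    have := pvH_le_of t t.length 4 i hi kc hm hs
    omega
  have h4 : pvH t t.length 4 ≤ 4 := pvH_le _ _ _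
  by_cases h0 : pvCond 0 title = true
  · have := hle 0 (by omega) h0
    simp [h0]; omega
  · replace h0 := Bool.eq_false_iff.mpr h0
    by_cases h1 : pvCond 1 title = true
    · have := hle 1 (by omega) h1
      have := hnot 0 (by omega) h0
      simp [h0, h1]; omega
    · replace h1 := Bool.eq_false_iff.mpr h1
      by_cases h2 : pvCond 2 title = true
      · have := hle 2 (by omega) h2
        have := hnot 0 (by omega) h0
        have := hnot 1 (by omega) h1
        simp [h0, h1, h2]; omega
      · replace h2 := Bool.eq_false_iff.mpr h2
        by_cases h3 : pvCond 3 title = true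
        · have := hle 3 (by omega) h3
          have := hnot 0 (by omega) h0
          have := hnot 1 (by omega) h1
          have := hnot 2 (by omega) h2
          simp [h0, h1, h2, h3]; omega
        · replace h3 := Bool.eq_false_iff.mpr h3
          have := hnot 0 (by omega) h0
          have := hnot 1 (by omega) h1
          have := hnot 2 (by omega) h2
          have := hnot 3 (by omega) h3
          simp [h0, h1, h2, h3]; omega

-- ===== VERDICT (by name: the statement is the Claim_ definition above) =====
theorem get_personalized_opening_spec : Claim_equal_get_personalized_opening := by
  intro job_title company _
  unfold Spec_get_personalized_opening
  simp only [get_personalized_opening, get_personalized_opening_alt]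
  generalize (if job_title != "N/A" then PySem.Str.lower job_title else "") = title
  have hbest : (List.range title.toList.length).foldl
      (fun b i => pvKwCat.foldl
        (fun b' kc => if kc.2 < b' && PySem.Chars.startswith (List.drop i title.toList) kc.1 then kc.2 else b') b) 4
      = pvH title.toList title.toList.length 4 := rfl
  rw [hbest, pvBest_spec title]
  have e0 : pvCond 0 title = (["engineer", "developer", "technical", "software"].any
      (fun term => PySem.Str.isIn term title)) := rfl
  have e1 : pvCond 1 title = (["manager", "director", "vp", "vice president", "lead"].any
      (fun term => PySem.Str.isIn term title)) := rfl
  have e2 : pvCond 2 title = (["founder", "ceo", "entrepreneur", "co-founder"].any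
      (fun term => PySem.Str.isIn term title)) := rfl
  have e3 : pvCond 3 title = (["analyst", "consultant", "specialist"].any
      (fun term => PySem.Str.isIn term title)) := rfl
  rw [← e0, ← e1, ← e2, ← e3]
  by_cases h0 : pvCond 0 title = true <;>
    by_cases h1 : pvCond 1 title = true <;>
      by_cases h2 : pvCond 2 title = true <;>
        by_cases h3 : pvCond 3 title = true <;>
          simp [h0, h1, h2, h3, pvMessages]
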